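-- pv_equiv track=rewrite | github.com/pypi-data/pypi-mirror-401 | packages/xython/xython-4.2.0.tar.gz/xython-4.2.0/src/xython/xy_util.py | find_more_elements
-- ===== SOURCE A (Python) =====
-- import chardet, re, os, collections, zipfile, sys
--
-- def find_more_elements(list1, list2):
-- 	"""
-- 	두개의 리스트에서, 작은것을 기준으로 큰것중에 어느부분이 더 있고, 위치는 어디인지를 알려주는 것
-- 	이것의 사용목적은 워드에서 영역안의 글자를 읽어오는데, 3가지의 경우가 잇어서, 어떤것이 어떤 부분이 다른것들과 차이가 나는지를
-- 	확인하기위해서 만든것이다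
--
-- 	:param list1:
-- 	:param list2:
-- 	:return:
-- 	"""
--
-- 	counter1 = collections.Counter(list1)
-- 	counter2 = collections.Counter(list2)
-- 	if len(counter1) < len(counter2):
-- 		smaller_counter = counter1
-- 		larger_counter = counter2
-- 		smaller_list = list1
-- 		larger_list = list2
-- 	else:
-- 		smaller_counter = counter2
-- 		larger_counter = counter1
-- 		smaller_list = list2
-- 		larger_list = list1
-- 	more_elements = []
-- 	for element in larger_counter:
-- 		if element not in smaller_counter or larger_counter[element] > smaller_counter[element]:
-- 			more_elements.append(element)
-- 	result = []
-- 	for element in more_elements: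
-- 		positions = [i for i, x in enumerate(larger_list) if x == element]
-- 		result.append((element, positions))
-- 	return result
-- ===== SOURCE B (Python) =====
-- def find_more_elements(list1, list2):
--     # Choose smaller/larger by number of distinct elements (tie -> list2 smaller),
--     # then index the larger list once: element -> all its positions.
--     if len(set(list1)) < len(set(list2)):
--         smaller_list, larger_list = list1, list2
--     else:
--         smaller_list, larger_list = list2, list1
--     positions = {}
--     for i, x in enumerate(larger_list):
--         positions.setdefault(x, []).append(i)
--     smaller_counts = {}
--     for x in smaller_list:
--         smaller_counts[x] = smaller_counts.get(x, 0) + 1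
--     return [(e, pos) for e, pos in positions.items()
--             if e not in smaller_counts or len(pos) > smaller_counts[e]]
-- ===== Notes on version B (the rewrite author's own statement) =====
-- stated objective: faster
-- what changed: Instead of computing both Counters and then rescanning the whole larger list once per extra element, B indexes the larger list once into an element-to-positions dict and emits qualifying entries in a single filter over that index (counts of the larger side come from the position-list lengths).
import Mathlib
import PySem

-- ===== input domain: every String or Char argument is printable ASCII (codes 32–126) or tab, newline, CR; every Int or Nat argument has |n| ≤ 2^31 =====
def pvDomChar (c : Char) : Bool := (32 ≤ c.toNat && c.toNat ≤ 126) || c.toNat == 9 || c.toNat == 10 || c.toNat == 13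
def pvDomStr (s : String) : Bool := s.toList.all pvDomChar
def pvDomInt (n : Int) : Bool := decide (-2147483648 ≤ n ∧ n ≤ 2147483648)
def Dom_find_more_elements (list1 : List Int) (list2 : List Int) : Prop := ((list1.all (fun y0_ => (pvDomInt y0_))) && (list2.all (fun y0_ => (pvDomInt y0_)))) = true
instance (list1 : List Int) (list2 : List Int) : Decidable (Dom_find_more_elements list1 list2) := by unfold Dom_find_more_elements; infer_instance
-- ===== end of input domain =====

-- B replaces A's repeated full scans of the larger list (one scan per extra element) by a single
-- position-indexing pass over the larger list plus one filter over that index (objective: faster).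

-- ===== PORT A =====
def find_more_elements (list1 : List Int) (list2 : List Int) : List (Int × List Int) :=
  let counter1 := PySem.Dict.counter list1
  let counter2 := PySem.Dict.counter list2
  let sel := if counter1.size < counter2.size then (counter1, counter2, list1, list2)
             else (counter2, counter1, list2, list1)
  let smaller_counter := sel.1
  let larger_counter := sel.2.1
  let larger_list := sel.2.2.2
  let more_elements := larger_counter.keys.foldl (fun acc element =>
      if !smaller_counter.contains element
         || smaller_counter.getD element 0 < larger_counter.getD element 0
      then acc ++ [element] else acc) []
  more_elements.foldl (fun result element =>
      result ++ [(element,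
        ((PySem.List.enumerate larger_list 0).filter (fun p => p.2 == element)).map (fun p => p.1))]) []

-- ===== PORT B =====
def find_more_elements_alt (list1 : List Int) (list2 : List Int) : List (Int × List Int) :=
  let sel := if (PySem.Set.ofList list1).length < (PySem.Set.ofList list2).length
             then (list1, list2) else (list2, list1)
  let smaller_list := sel.1
  let larger_list := sel.2
  let positions := (PySem.List.enumerate larger_list 0).foldl
      (fun d q => d.modify q.2 [] (· ++ [q.1])) PySem.Dict.empty
  let smaller_counts := smaller_list.foldl
      (fun (d : PySem.Dict Int Int) x => d.insert x (d.getD x 0 + 1)) PySem.Dict.empty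
  positions.items.filter (fun q =>
      !smaller_counts.contains q.1 || smaller_counts.getD q.1 0 < (q.2.length : Int))

-- ===== PRECONDITION & SPEC =====
def Spec_find_more_elements (list1 : List Int) (list2 : List Int) (out : List (Int × List Int)) : Prop := out = find_more_elements_alt list1 list2
instance (list1 : List Int) (list2 : List Int) (out : List (Int × List Int)) : Decidable (Spec_find_more_elements list1 list2 out) := by unfold Spec_find_more_elements; infer_instance

-- ===== CLAIM (what is proved, stated in full; the proofs are below) =====
def Claim_equal_find_more_elements : Prop := ∀ (list1 : List Int) (list2 : List Int), Dom_find_more_elements list1 list2 → Spec_find_more_elements list1 list2 (find_more_elements list1 list2)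

-- ===== LEMMAS AND PROOFS =====

-- B's position-indexing fold, characterised at one key (key/value swapped w.r.t. PySem.Dict.getD_foldl_modify_append)
theorem getD_posfold (l : List (Int × Int)) (d : PySem.Dict Int (List Int)) (c : Int) :
    (l.foldl (fun d q => d.modify q.2 [] (· ++ [q.1])) d).getD c []
      = d.getD c [] ++ (l.filter (fun q => q.2 == c)).map (fun p => p.1) := by
  induction l generalizing d with
  | nil => simp
  | cons q t ih =>
    simp only [List.foldl_cons, List.filter_cons, ih]
    by_cases h : q.2 = c
    · simp [h, PySem.Dict.getD_modify_self]
    · simp [h, PySem.Dict.getD_modify_of_ne _ _ _ (Ne.symm h)]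

theorem counter_size_eq (xs : List Int) :
    (PySem.Dict.counter xs).size = (PySem.Set.ofList xs).length := by
  have h := PySem.Dict.keys_counter xs
  calc (PySem.Dict.counter xs).size
      = (PySem.Dict.counter xs).keys.length := by simp [PySem.Dict.size, PySem.Dict.keys]
    _ = (PySem.Set.ofList xs).length := by rw [h]

-- the position list A builds for e has exactly count(L, e) entries
theorem pos_length (L : List Int) (e : Int) :
    (((PySem.List.enumerate L 0).filter (fun p => p.2 == e)).map (fun p => p.1)).length
      = L.count e := by
  have h := List.countP_map (p := fun x : Int => x == e) (f := fun p : Int × Int => p.2)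
    (l := PySem.List.enumerate L 0)
  rw [PySem.List.map_snd_enumerate] at h
  simp only [Function.comp_def] at h
  simp only [List.length_map, ← List.countP_eq_length_filter, List.count]
  exact h.symm

-- core equality, for an already-chosen (smaller S, larger L) pair
theorem main_eq (S L : List Int) :
    ((PySem.Dict.counter L).keys.foldl (fun acc element =>
      if !(PySem.Dict.counter S).contains element
         || (PySem.Dict.counter S).getD element 0 < (PySem.Dict.counter L).getD element 0
      then acc ++ [element] else acc) []).foldl (fun result element =>
      result ++ [(element,
        ((PySem.List.enumerate L 0).filter (fun p => p.2 == element)).map (fun p => p.1))]) []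
    =
    (((PySem.List.enumerate L 0).foldl
      (fun d q => d.modify q.2 [] (· ++ [q.1])) PySem.Dict.empty).items.filter (fun q =>
      !(S.foldl (fun (d : PySem.Dict Int Int) x => d.insert x (d.getD x 0 + 1)) PySem.Dict.empty).contains q.1
        || (S.foldl (fun (d : PySem.Dict Int Int) x => d.insert x (d.getD x 0 + 1)) PySem.Dict.empty).getD q.1 0 < (q.2.length : Int))) := by
  rw [PySem.Dict.foldl_insert_getD_add_one_eq_counter]
  set posd := (PySem.List.enumerate L 0).foldl
      (fun d q => d.modify q.2 [] (· ++ [q.1])) PySem.Dict.empty with hposd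
  have hnd : posd.keys.Nodup := by
    apply PySem.Dict.nodup_keys_foldl_modify_key
    simp
  have hkeys : posd.keys = PySem.Set.ofList L := by
    rw [hposd, PySem.Dict.keys_foldl_modify_key (PySem.List.enumerate L 0)
      (fun q => q.2) [] (fun _ q v => v ++ [q.1]) PySem.Dict.empty]
    rw [PySem.List.map_snd_enumerate]
    simp [PySem.Set.update, PySem.Set.ofList_eq_foldl]
  have hget : ∀ c, posd.getD c [] =
      ((PySem.List.enumerate L 0).filter (fun q => q.2 == c)).map (fun p => p.1) := by
    intro c
    rw [hposd, getD_posfold]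
    simp
  rw [PySem.Dict.items_eq_map_keys posd hnd [], hkeys, List.filter_map]
  rw [PySem.List.foldl_append_if
    (p := fun element =>
      !(PySem.Dict.counter S).contains element
        || decide ((PySem.Dict.counter S).getD element 0 < (PySem.Dict.counter L).getD element 0))
    (f := fun element : Int => element)]
  rw [PySem.List.foldl_append_singleton_eq_map]
  rw [PySem.Dict.keys_counter]
  simp only [List.nil_append, Function.comp_def, hget, pos_length,
    PySem.Dict.getD_counter, List.map_id_fun', id]

-- ===== VERDICT (by name: the statement is the Claim_ definition above) =====
theorem find_more_elements_spec : Claim_equal_find_more_elements := by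
  intro list1 list2 _
  unfold Spec_find_more_elements find_more_elements find_more_elements_alt
  simp only [counter_size_eq]
  by_cases h : (PySem.Set.ofList list1).length < (PySem.Set.ofList list2).length
  · simp only [h, if_pos]
    exact main_eq list1 list2
  · simp only [h, if_false]
    exact main_eq list2 list1
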